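-- pv_equiv track=rewrite | github.com/clips/clicr | dataset-code/build_queries.py | mark_query_entities
-- ===== SOURCE A (Python) =====
-- def fix_marks(txt, marker1, marker2):
--     """
--     Clamp sometimes start the concept mid-word, e.g. at a dash. This function fixes that.
--     """
--     fixed_txt = []
--     for s in txt.split("\n"):
--         fixed_s = []
--         for w in s.split(" "):
--             if marker1 in w and marker2 in w:
--                 if not (w.startswith(marker1) and w.endswith(marker2)):
--                     start_idx_m2 = w.find(marker2)
--                     start_idx_m1 = w.find(marker1)
--                     if start_idx_m2 > start_idx_m1:
--                         w = w[:start_idx_m1] + " " + w[start_idx_m1:start_idx_m2 + len(marker2)] + " " + w[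
--                                                                                                          start_idx_m2 + len(
--                                                                                                              marker2):]
--                     else:
--                         w = w[:start_idx_m2 + len(marker2)] + " " + w[start_idx_m2 + len(marker2):start_idx_m1] + " " + w[
--                                                                                                                     start_idx_m1:]
--             elif marker1 in w or marker2 in w:
--                 if marker1 in w and not w.startswith(marker1):
--                     _w = w
--                     if not _w.startswith(marker1):
--                         start_idx = _w.find(marker1)
--                         end_idx = start_idx + len(marker1)
--                         w = _w[:start_idx] + " " + marker1 + _w[end_idx:]
--                 if marker2 in w and not w.endswith(marker2):
--                     _w = w
--                     if not _w.endswith(marker2):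
--                         start_idx = _w.find(marker2)
--                         end_idx = start_idx + len(marker2)
--                         w = _w[:start_idx] + marker2 + " " + _w[end_idx:]
--             fixed_s.append(w)
--         fixed_txt.append(fixed_s)
--     fixed_txt_str = "\n".join([" ".join(s) for s in fixed_txt])
--
--     return fixed_txt_str
--
-- def mark_query_entities(txt, s_to_ls, e_to_s_idx, s_offset, marker1="__", marker2="__"):
--     def format_label(label):
--         """
--         :param label: ('problem', 'absent', 'C2945640')
--         """
--         return label[0][:2].title()
--
--
--     marked_txt = ""
--
--     for i, char in enumerate(txt):
--         if i + s_offset in s_to_ls: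
--             new_char = "{0}{1}".format(marker1, char)
--         elif i + s_offset in e_to_s_idx and i != 0:
--             # new_char = "{0}{2}{1}".format(marker2, char, format_label(s_to_ls[e_to_s_idx[i]]))
--             new_char = "{0}{1}".format(marker2, char)
--         else:
--             new_char = char
--
--         marked_txt += new_char
--
--     if marker1 and marker2:
--         marked_txt = fix_marks(marked_txt, marker1, marker2)
--     return marked_txt
-- ===== SOURCE B (Python) =====
-- def fix_marks(txt, marker1, marker2):
--     """
--     Clamp sometimes start the concept mid-word, e.g. at a dash. This function fixes that.
--     """
--     fixed_txt = []
--     for s in txt.split("\n"):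
--         fixed_s = []
--         for w in s.split(" "):
--             if marker1 in w and marker2 in w:
--                 if not (w.startswith(marker1) and w.endswith(marker2)):
--                     start_idx_m2 = w.find(marker2)
--                     start_idx_m1 = w.find(marker1)
--                     if start_idx_m2 > start_idx_m1:
--                         w = w[:start_idx_m1] + " " + w[start_idx_m1:start_idx_m2 + len(marker2)] + " " + w[start_idx_m2 + len(marker2):]
--                     else:
--                         w = w[:start_idx_m2 + len(marker2)] + " " + w[start_idx_m2 + len(marker2):start_idx_m1] + " " + w[start_idx_m1:]
--             elif marker1 in w or marker2 in w:
--                 if marker1 in w and not w.startswith(marker1):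
--                     _w = w
--                     if not _w.startswith(marker1):
--                         start_idx = _w.find(marker1)
--                         end_idx = start_idx + len(marker1)
--                         w = _w[:start_idx] + " " + marker1 + _w[end_idx:]
--                 if marker2 in w and not w.endswith(marker2):
--                     _w = w
--                     if not _w.endswith(marker2):
--                         start_idx = _w.find(marker2)
--                         end_idx = start_idx + len(marker2)
--                         w = _w[:start_idx] + marker2 + " " + _w[end_idx:]
--             fixed_s.append(w)
--         fixed_txt.append(fixed_s)
--     return "\n".join([" ".join(s) for s in fixed_txt])
--
--
-- def mark_query_entities(txt, s_to_ls, e_to_s_idx, s_offset, marker1="__", marker2="__"):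
--     # Compute the marked positions once from the dict keys, then assemble the
--     # result by slicing txt between consecutive marker positions.
--     n = len(txt)
--     starts = {k - s_offset for k in s_to_ls if 0 <= k - s_offset < n}
--     ends = {k - s_offset for k in e_to_s_idx if 0 < k - s_offset < n} - starts
--     pieces = []
--     prev = 0
--     for i in sorted(starts | ends):
--         pieces.append(txt[prev:i])
--         pieces.append((marker1 if i in starts else marker2) + txt[i])
--         prev = i + 1
--     pieces.append(txt[prev:])
--     marked = "".join(pieces)
--     if marker1 and marker2:
--         marked = fix_marks(marked, marker1, marker2)
--     return marked
-- ===== Notes on version B (the rewrite author's own statement) =====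
-- stated objective: alternative
-- what changed: A scans txt character by character, testing dict membership of i+s_offset for every character and appending to a growing string; B computes the set of start/end marker positions once from the dict keys, sorts it, and assembles the result from slices of txt between consecutive marker positions (fix_marks is kept as-is).
import Mathlib
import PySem

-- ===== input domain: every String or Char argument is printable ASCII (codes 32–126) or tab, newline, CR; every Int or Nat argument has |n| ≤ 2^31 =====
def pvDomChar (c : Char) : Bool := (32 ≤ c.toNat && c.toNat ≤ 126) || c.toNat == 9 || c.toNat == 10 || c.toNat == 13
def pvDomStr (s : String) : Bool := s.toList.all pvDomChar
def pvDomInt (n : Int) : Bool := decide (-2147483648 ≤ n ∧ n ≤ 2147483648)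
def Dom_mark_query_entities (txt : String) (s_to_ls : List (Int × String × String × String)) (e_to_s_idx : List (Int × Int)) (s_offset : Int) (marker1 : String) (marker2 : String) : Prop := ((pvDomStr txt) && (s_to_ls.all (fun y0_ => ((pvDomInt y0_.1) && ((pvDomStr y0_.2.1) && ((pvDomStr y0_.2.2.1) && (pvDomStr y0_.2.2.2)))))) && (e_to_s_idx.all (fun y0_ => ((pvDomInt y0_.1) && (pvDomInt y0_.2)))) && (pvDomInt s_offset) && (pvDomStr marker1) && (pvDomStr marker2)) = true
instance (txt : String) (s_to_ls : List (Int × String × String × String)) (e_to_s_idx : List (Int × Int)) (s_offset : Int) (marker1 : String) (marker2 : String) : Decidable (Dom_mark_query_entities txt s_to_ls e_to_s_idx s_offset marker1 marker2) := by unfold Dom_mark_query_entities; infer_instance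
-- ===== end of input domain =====

-- B replaces A's per-character scan (a dict-membership test for every character) by computing the
-- marked positions once from the dict keys and assembling the result from slices of txt; same value.

-- ===== PORT A =====
-- fix_marks, shared verbatim by both Pythons (A's module helper; Source B carries the same copy), ported once.
def pvFixWord (m1 m2 w : List Char) : List Char :=
  if PySem.Chars.isIn m1 w && PySem.Chars.isIn m2 w then
    if !(PySem.Chars.startswith w m1 && PySem.Chars.endswith w m2) then
      let i2 := PySem.Chars.find w m2
      let i1 := PySem.Chars.find w m1
      if i2 > i1 then
        PySem.List.slice w none (some i1) ++ [' '] ++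
          PySem.List.slice w (some i1) (some (i2 + (PySem.Chars.len m2 : Int))) ++ [' '] ++
          PySem.List.slice w (some (i2 + (PySem.Chars.len m2 : Int))) none
      else
        PySem.List.slice w none (some (i2 + (PySem.Chars.len m2 : Int))) ++ [' '] ++
          PySem.List.slice w (some (i2 + (PySem.Chars.len m2 : Int))) (some i1) ++ [' '] ++
          PySem.List.slice w (some i1) none
    else w
  else if PySem.Chars.isIn m1 w || PySem.Chars.isIn m2 w then
    let w1 :=
      if PySem.Chars.isIn m1 w && !PySem.Chars.startswith w m1 then
        if !PySem.Chars.startswith w m1 then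
          let st := PySem.Chars.find w m1
          let en := st + (PySem.Chars.len m1 : Int)
          PySem.List.slice w none (some st) ++ [' '] ++ m1 ++ PySem.List.slice w (some en) none
        else w
      else w
    if PySem.Chars.isIn m2 w1 && !PySem.Chars.endswith w1 m2 then
      if !PySem.Chars.endswith w1 m2 then
        let st := PySem.Chars.find w1 m2
        let en := st + (PySem.Chars.len m2 : Int)
        PySem.List.slice w1 none (some st) ++ m2 ++ [' '] ++ PySem.List.slice w1 (some en) none
      else w1
    else w1
  else w

def pvFixMarks (txt m1 m2 : List Char) : List Char :=
  PySem.Chars.join ['\n']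
    ((PySem.Chars.splitOn txt ['\n']).map (fun s =>
      PySem.Chars.join [' '] ((PySem.Chars.splitOn s [' ']).map (pvFixWord m1 m2))))

-- A's loop: for i, char in enumerate(txt) — dict membership 'i+s_offset in d' is key membership.
def pvMarkA (s_keys e_keys : List Int) (off : Int) (m1 m2 : List Char) : Nat → List Char → List Char
  | _, [] => []
  | i, c :: cs =>
    (if s_keys.any (fun k => k == (i : Int) + off) then m1 ++ [c]
     else if e_keys.any (fun k => k == (i : Int) + off) && (i != 0) then m2 ++ [c]
     else [c]) ++ pvMarkA s_keys e_keys off m1 m2 (i + 1) cs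

def mark_query_entities (txt : String) (s_to_ls : List (Int × String × String × String)) (e_to_s_idx : List (Int × Int)) (s_offset : Int) (marker1 : String) (marker2 : String) : String :=
  let marked := pvMarkA (s_to_ls.map Prod.fst) (e_to_s_idx.map Prod.fst) s_offset marker1.toList marker2.toList 0 txt.toList
  let marked := if marker1.toList ≠ [] ∧ marker2.toList ≠ [] then pvFixMarks marked marker1.toList marker2.toList else marked
  String.mk marked

-- ===== PORT B =====
-- Source B's loop over the sorted marker positions; txt[i] is in range by construction (0 ≤ i < len).
def pvBuildB (cs m1 m2 : List Char) (starts : PySem.Set Int) : Int → List Int → List Char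
  | prev, [] => PySem.List.slice cs (some prev) none
  | prev, i :: rest =>
      PySem.List.slice cs (some prev) (some i) ++
      (if PySem.Set.contains starts i then m1 else m2) ++
      ((PySem.List.pyGet? cs i).elim [] (fun c => [c])) ++
      pvBuildB cs m1 m2 starts (i + 1) rest

def mark_query_entities_alt (txt : String) (s_to_ls : List (Int × String × String × String)) (e_to_s_idx : List (Int × Int)) (s_offset : Int) (marker1 : String) (marker2 : String) : String :=
  let cs := txt.toList
  let n : Int := cs.length
  let starts : PySem.Set Int := PySem.Set.ofList
    ((s_to_ls.map Prod.fst).filterMap (fun k => if 0 ≤ k - s_offset ∧ k - s_offset < n then some (k - s_offset) else none))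
  let ends : PySem.Set Int := PySem.Set.diff
    (PySem.Set.ofList ((e_to_s_idx.map Prod.fst).filterMap (fun k => if 0 < k - s_offset ∧ k - s_offset < n then some (k - s_offset) else none)))
    starts
  let positions := PySem.List.sorted (PySem.Set.union starts ends) (fun x => x) false
  let marked := pvBuildB cs marker1.toList marker2.toList starts 0 positions
  let marked := if marker1.toList ≠ [] ∧ marker2.toList ≠ [] then pvFixMarks marked marker1.toList marker2.toList else marked
  String.mk marked

-- ===== PRECONDITION & SPEC =====
def Spec_mark_query_entities (txt : String) (s_to_ls : List (Int × String × String × String)) (e_to_s_idx : List (Int × Int)) (s_offset : Int) (marker1 : String) (marker2 : String) (out : String) : Prop := out = mark_query_entities_alt txt s_to_ls e_to_s_idx s_offset marker1 marker2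
instance (txt : String) (s_to_ls : List (Int × String × String × String)) (e_to_s_idx : List (Int × Int)) (s_offset : Int) (marker1 : String) (marker2 : String) (out : String) : Decidable (Spec_mark_query_entities txt s_to_ls e_to_s_idx s_offset marker1 marker2 out) := by unfold Spec_mark_query_entities; infer_instance

-- ===== CLAIM (what is proved, stated in full; the proofs are below) =====
def Claim_equal_mark_query_entities : Prop := ∀ (txt : String) (s_to_ls : List (Int × String × String × String)) (e_to_s_idx : List (Int × Int)) (s_offset : Int) (marker1 : String) (marker2 : String), Dom_mark_query_entities txt s_to_ls e_to_s_idx s_offset marker1 marker2 → Spec_mark_query_entities txt s_to_ls e_to_s_idx s_offset marker1 marker2 (mark_query_entities txt s_to_ls e_to_s_idx s_offset marker1 marker2)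

-- ===== LEMMAS AND PROOFS =====
-- the marker A's loop prepends before the character at (int) position j
def pvTag (s_keys e_keys : List Int) (off : Int) (m1 m2 : List Char) (j : Int) : List Char :=
  if s_keys.any (fun k => k == j + off) then m1
  else if e_keys.any (fun k => k == j + off) && !(j == 0) then m2
  else []

-- the common normal form: marker-before-char, per index of the text
def pvSpec (s_keys e_keys : List Int) (off : Int) (m1 m2 cs : List Char) (lo hi : Int) : List Char :=
  ((PySem.List.pyRange lo hi 1).map (fun j => pvTag s_keys e_keys off m1 m2 j ++ (cs.drop j.toNat).take 1)).flatten

lemma pvSpec_append (sk ek : List Int) (off : Int) (m1 m2 cs : List Char) (lo m hi : Int)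
    (h1 : lo ≤ m) (h2 : m ≤ hi) :
    pvSpec sk ek off m1 m2 cs lo hi = pvSpec sk ek off m1 m2 cs lo m ++ pvSpec sk ek off m1 m2 cs m hi := by
  unfold pvSpec
  rw [PySem.List.pyRange_one_append lo m hi h1 h2, List.map_append, List.flatten_append]

lemma pvMarkA_eq_spec (sk ek : List Int) (off : Int) (m1 m2 cs : List Char) :
    ∀ (cs' : List Char) (i : Nat), cs.drop i = cs' →
      pvMarkA sk ek off m1 m2 i cs' = pvSpec sk ek off m1 m2 cs (i : Int) (cs.length : Int) := by
  intro cs'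
  induction cs' with
  | nil =>
    intro i h
    have hlen : cs.length ≤ i := by
      have := List.drop_eq_nil_iff.mp h
      omega
    unfold pvSpec
    rw [PySem.List.pyRange_one_eq_nil (by exact_mod_cast hlen)]
    simp [pvMarkA]
  | cons c t ih =>
    intro i h
    have hi : i < cs.length := by
      by_contra hc
      have : cs.drop i = [] := List.drop_eq_nil_of_le (by omega)
      rw [this] at h; exact (List.cons_ne_nil c t) h.symm
    have ht : cs.drop (i + 1) = t := by
      rw [← List.tail_drop, h]
      rfl
    have hrec := ih (i + 1) ht
    unfold pvSpec
    rw [PySem.List.pyRange_one_cons (by exact_mod_cast hi)]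
    simp only [List.map_cons, List.flatten_cons]
    have htake : (cs.drop ((i : Int)).toNat).take 1 = [c] := by
      rw [Int.toNat_natCast, h]; rfl
    rw [htake]
    show (if sk.any (fun k => k == (i : Int) + off) then m1 ++ [c]
        else if ek.any (fun k => k == (i : Int) + off) && (i != 0) then m2 ++ [c]
        else [c]) ++ pvMarkA sk ek off m1 m2 (i + 1) t = _
    rw [hrec]
    unfold pvSpec
    have hcast : ((i : Int) + 1) = ((i + 1 : Nat) : Int) := by push_cast; ring
    rw [← hcast]
    have hz : (i != 0) = !((i : Int) == 0) := by
      rcases Nat.eq_zero_or_pos i with h0 | h0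
      · subst h0; rfl
      · have h1 : (i != 0) = true := by simp; omega
        have h2 : ((i : Int) == 0) = false := by simp; omega
        rw [h1, h2]; rfl
    rw [hz]
    unfold pvTag
    split_ifs <;> simp
lemma pvSpec_empty (sk ek : List Int) (off : Int) (m1 m2 cs : List Char) :
    ∀ (k lo : Nat), lo + k ≤ cs.length →
      (∀ j : Int, (lo : Int) ≤ j → j < (lo : Int) + (k : Int) → pvTag sk ek off m1 m2 j = []) →
      pvSpec sk ek off m1 m2 cs (lo : Int) ((lo : Int) + (k : Int)) = (cs.drop lo).take k := by
  intro k
  induction k with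
  | zero =>
    intro lo _ _
    unfold pvSpec
    rw [PySem.List.pyRange_one_eq_nil (by omega)]
    simp
  | succ k ih =>
    intro lo hle hemp
    have hlo : lo < cs.length := by omega
    unfold pvSpec
    rw [PySem.List.pyRange_one_cons (by push_cast; omega)]
    simp only [List.map_cons, List.flatten_cons]
    have h1 : pvTag sk ek off m1 m2 (lo : Int) = [] := hemp _ le_rfl (by push_cast; omega)
    have hdrop : cs.drop lo = cs[lo] :: cs.drop (lo + 1) := List.drop_eq_getElem_cons hlo
    have htake : (cs.drop ((lo : Int)).toNat).take 1 = [cs[lo]] := by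
      rw [Int.toNat_natCast, hdrop]; rfl
    have htail : pvSpec sk ek off m1 m2 cs ((lo : Int) + 1) ((lo : Int) + ((k + 1 : Nat) : Int))
        = (cs.drop (lo + 1)).take k := by
      have hc : ((lo : Int) + 1) = ((lo + 1 : Nat) : Int) := by push_cast; ring
      have hc2 : ((lo : Int) + ((k + 1 : Nat) : Int)) = (((lo + 1 : Nat) : Int) + (k : Nat)) := by push_cast; ring
      rw [hc, hc2]
      exact ih (lo + 1) (by omega) (fun j hj1 hj2 => hemp j (by push_cast at hj1 ⊢; omega) (by push_cast at hj2 ⊢; omega))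
    rw [h1, htake]
    unfold pvSpec at htail
    rw [htail]
    rw [hdrop, List.take_succ_cons]
    simp
lemma pvBuildB_eq_spec (sk ek : List Int) (off : Int) (m1 m2 cs : List Char) (starts : PySem.Set Int) :
    ∀ (ps : List Int) (prev : Nat), prev ≤ cs.length →
      ps.Pairwise (· < ·) →
      (∀ p ∈ ps, (prev : Int) ≤ p ∧ p < (cs.length : Int)) →
      (∀ j : Int, (prev : Int) ≤ j → j < (cs.length : Int) → j ∉ ps → pvTag sk ek off m1 m2 j = []) →
      (∀ p ∈ ps, (if PySem.Set.contains starts p then m1 else m2) = pvTag sk ek off m1 m2 p) →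
      pvBuildB cs m1 m2 starts (prev : Int) ps = pvSpec sk ek off m1 m2 cs (prev : Int) (cs.length : Int) := by
  intro ps
  induction ps with
  | nil =>
    intro prev hprev _ _ hemp _
    show PySem.List.slice cs (some (prev : Int)) none = _
    rw [PySem.List.slice_from_natCast]
    have hc : (cs.length : Int) = ((prev : Int) + ((cs.length - prev : Nat) : Int)) := by push_cast; omega
    rw [hc, pvSpec_empty sk ek off m1 m2 cs (cs.length - prev) prev (by omega)
      (fun j hj1 hj2 => hemp j hj1 (by push_cast at hj2 ⊢; omega) (List.not_mem_nil))]
    exact (List.take_of_length_le (by simp)).symm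
  | cons i rest ih =>
    intro prev hprev hpw hbnd hemp htag
    obtain ⟨hi1, hi2⟩ := hbnd i (List.mem_cons_self)
    have hi0 : 0 ≤ i := le_trans (by exact_mod_cast Nat.zero_le prev) hi1
    set iN := i.toNat with hiN
    have hieq : i = (iN : Int) := (Int.toNat_of_nonneg hi0).symm
    have hiNlt : iN < cs.length := by omega
    have hrest_gt : ∀ p ∈ rest, i < p := (List.pairwise_cons.mp hpw).1
    -- split the spec at iN and iN+1
    rw [pvSpec_append sk ek off m1 m2 cs (prev : Int) (iN : Int) (cs.length : Int) (by omega) (by omega)]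
    rw [pvSpec_append sk ek off m1 m2 cs (iN : Int) ((iN : Int) + 1) (cs.length : Int) (by omega) (by omega)]
    show PySem.List.slice cs (some (prev : Int)) (some i) ++
      (if PySem.Set.contains starts i then m1 else m2) ++
      ((PySem.List.pyGet? cs i).elim [] (fun c => [c])) ++
      pvBuildB cs m1 m2 starts (i + 1) rest = _
    -- first chunk
    have hchunk : pvSpec sk ek off m1 m2 cs (prev : Int) (iN : Int) = (cs.drop prev).take (iN - prev) := by
      have hc : (iN : Int) = ((prev : Int) + ((iN - prev : Nat) : Int)) := by push_cast; omega
      rw [hc]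
      refine pvSpec_empty sk ek off m1 m2 cs (iN - prev) prev (by omega) ?_
      intro j hj1 hj2
      refine hemp j hj1 (by push_cast at hj2 ⊢; omega) ?_
      intro hmem
      rcases List.mem_cons.mp hmem with h | h
      · push_cast at hj2; omega
      · have := hrest_gt j h; push_cast at hj2; omega
    -- middle singleton
    have hmid : pvSpec sk ek off m1 m2 cs (iN : Int) ((iN : Int) + 1) =
        pvTag sk ek off m1 m2 (iN : Int) ++ [cs[iN]] := by
      unfold pvSpec
      rw [PySem.List.pyRange_one_cons (by omega), PySem.List.pyRange_one_eq_nil (by omega)]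
      have hone : (cs.drop iN).take 1 = [cs[iN]] := by
        rw [List.drop_eq_getElem_cons hiNlt]
        rfl
      simp [hone]
    -- tail
    have htail : pvBuildB cs m1 m2 starts (i + 1) rest =
        pvSpec sk ek off m1 m2 cs ((iN : Int) + 1) (cs.length : Int) := by
      have hc : i + 1 = ((iN + 1 : Nat) : Int) := by push_cast; omega
      rw [hc]
      have hc2 : ((iN : Int) + 1) = ((iN + 1 : Nat) : Int) := by push_cast; ring
      rw [hc2]
      refine ih (iN + 1) (by omega) (List.pairwise_cons.mp hpw).2 ?_ ?_ ?_
      · intro p hp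
        have h1 := hrest_gt p hp
        have h2 := hbnd p (List.mem_cons_of_mem i hp)
        constructor
        · push_cast; omega
        · exact h2.2
      · intro j hj1 hj2 hj3
        refine hemp j (by push_cast at hj1 ⊢; omega) hj2 ?_
        intro hmem
        rcases List.mem_cons.mp hmem with h | h
        · push_cast at hj1; omega
        · exact hj3 h
      · intro p hp; exact htag p (List.mem_cons_of_mem i hp)
    rw [hchunk, hmid, htail]
    have hslice : PySem.List.slice cs (some (prev : Int)) (some i) = (cs.drop prev).take (iN - prev) := by
      rw [hieq, PySem.List.slice_natCast]
    have hget : (PySem.List.pyGet? cs i).elim [] (fun c => [c]) = [cs[iN]] := by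
      rw [hieq, PySem.List.pyGet?_natCast, List.getElem?_eq_getElem hiNlt]
      rfl
    have htg : (if PySem.Set.contains starts i then m1 else m2) = pvTag sk ek off m1 m2 (iN : Int) := by
      rw [← hieq]; exact htag i (List.mem_cons_self)
    rw [hslice, hget, htg]
    simp [List.append_assoc]
-- membership in the comprehension {k - off : k in L, P (k - off)}
lemma pv_mem_shift (L : List Int) (off : Int) (P : Int → Prop) [DecidablePred P] (p : Int) :
    (p ∈ L.filterMap (fun k => if P (k - off) then some (k - off) else none)) ↔
      (P p ∧ ∃ k ∈ L, k = p + off) := by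
  simp only [List.mem_filterMap]
  constructor
  · rintro ⟨k, hk, hif⟩
    by_cases h : P (k - off)
    · rw [if_pos h] at hif
      have hkp : k - off = p := Option.some_injective _ hif
      exact ⟨hkp ▸ h, k, hk, by omega⟩
    · rw [if_neg h] at hif
      simp at hif
  · rintro ⟨hP, k, hk, hke⟩
    refine ⟨k, hk, ?_⟩
    have hkp : k - off = p := by omega
    rw [hkp, if_pos hP]

-- ===== VERDICT (by name: the statement is the Claim_ definition above) =====
theorem mark_query_entities_spec : Claim_equal_mark_query_entities := by
  intro txt s_to_ls e_to_s_idx s_offset marker1 marker2 _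
  unfold Spec_mark_query_entities mark_query_entities mark_query_entities_alt
  set cs := txt.toList with hcs
  set sk := s_to_ls.map Prod.fst with hsk
  set ek := e_to_s_idx.map Prod.fst with hek
  set n : Int := (cs.length : Int) with hn
  set startsL : PySem.Set Int := PySem.Set.ofList
    (sk.filterMap (fun k => if 0 ≤ k - s_offset ∧ k - s_offset < n then some (k - s_offset) else none)) with hstartsL
  set endsL : PySem.Set Int := PySem.Set.diff
    (PySem.Set.ofList (ek.filterMap (fun k => if 0 < k - s_offset ∧ k - s_offset < n then some (k - s_offset) else none)))
    startsL with hendsL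
  set positions := PySem.List.sorted (PySem.Set.union startsL endsL) (fun x => x) false with hpos
  have hmemS : ∀ p : Int, p ∈ startsL ↔ ((0 ≤ p ∧ p < n) ∧ ∃ k ∈ sk, k = p + s_offset) := by
    intro p
    rw [hstartsL, PySem.Set.mem_ofList]
    exact pv_mem_shift sk s_offset (fun q => 0 ≤ q ∧ q < n) p
  have hmemE0 : ∀ p : Int,
      p ∈ PySem.Set.ofList (ek.filterMap (fun k => if 0 < k - s_offset ∧ k - s_offset < n then some (k - s_offset) else none)) ↔
        ((0 < p ∧ p < n) ∧ ∃ k ∈ ek, k = p + s_offset) := by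
    intro p
    rw [PySem.Set.mem_ofList]
    exact pv_mem_shift ek s_offset (fun q => 0 < q ∧ q < n) p
  have hmemP : ∀ p : Int, p ∈ positions ↔ (p ∈ startsL ∨ p ∈ endsL) := by
    intro p
    rw [hpos, PySem.List.mem_sorted, PySem.Set.mem_union]
  have hanyS : ∀ p : Int, (sk.any (fun k => k == p + s_offset) = true) ↔ ∃ k ∈ sk, k = p + s_offset := by
    intro p; simp [List.any_eq_true]
  have hanyE : ∀ p : Int, (ek.any (fun k => k == p + s_offset) = true) ↔ ∃ k ∈ ek, k = p + s_offset := by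
    intro p; simp [List.any_eq_true]
  have hcore : pvMarkA sk ek s_offset marker1.toList marker2.toList 0 cs =
      pvBuildB cs marker1.toList marker2.toList startsL 0 positions := by
    have hA := pvMarkA_eq_spec sk ek s_offset marker1.toList marker2.toList cs cs 0 rfl
    have hB := pvBuildB_eq_spec sk ek s_offset marker1.toList marker2.toList cs startsL positions 0
      (Nat.zero_le _)
      ?pw ?bnd ?emp ?tg
    · rw [hA]
      rw [show ((0 : Nat) : Int) = (0 : Int) from rfl] at hB
      rw [hB]
      norm_num
    case pw =>
      have hU : (PySem.Set.union startsL endsL).Nodup :=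
        PySem.Set.nodup_union startsL endsL (by rw [hstartsL]; exact PySem.Set.nodup_ofList _)
      have hnd : positions.Nodup := (PySem.List.sorted_perm _ _ _).symm.nodup hU
      have hle : positions.Pairwise (fun a b => a ≤ b) :=
        PySem.List.sorted_pairwise (PySem.Set.union startsL endsL) (fun x => x)
      exact (hle.and hnd).imp (fun h => lt_of_le_of_ne h.1 h.2)
    case bnd =>
      intro p hp
      rcases (hmemP p).mp hp with h | h
      · have h2 := ((hmemS p).mp h).1
        rw [hn] at h2
        constructor <;> push_cast <;> omega
      · have h2 := ((hmemE0 p).mp ((PySem.Set.mem_diff _ _ _).mp h).1).1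
        rw [hn] at h2
        constructor <;> push_cast <;> omega
    case emp =>
      intro j hj1 hj2 hj3
      unfold pvTag
      split_ifs with hS hE
      · exfalso
        exact hj3 ((hmemP j).mpr (Or.inl ((hmemS j).mpr ⟨⟨by omega, by omega⟩, (hanyS j).mp hS⟩)))
      · exfalso
        have hEany := (hanyE j).mp (Bool.and_elim_left hE)
        have hjne : j ≠ 0 := by
          have := Bool.and_elim_right hE; simpa using this
        have hj0 : 0 < j := by omega
        have hjE0 : j ∈ PySem.Set.ofList (ek.filterMap (fun k => if 0 < k - s_offset ∧ k - s_offset < n then some (k - s_offset) else none)) :=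
          (hmemE0 j).mpr ⟨⟨hj0, by omega⟩, hEany⟩
        by_cases hjS : j ∈ startsL
        · exact hj3 ((hmemP j).mpr (Or.inl hjS))
        · exact hj3 ((hmemP j).mpr (Or.inr ((PySem.Set.mem_diff _ _ _).mpr ⟨hjE0, hjS⟩)))
      · rfl
    case tg =>
      intro p hp
      have hpP := (hmemP p).mp hp
      by_cases hc : PySem.Set.contains startsL p = true
      · have hpS := (PySem.Set.contains_iff startsL p).mp hc
        have hany := (hanyS p).mpr ((hmemS p).mp hpS).2
        rw [if_pos hc]
        unfold pvTag
        rw [if_pos hany]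
      · have hpnS : p ∉ startsL := fun h => hc ((PySem.Set.contains_iff startsL p).mpr h)
        have hpE : p ∈ endsL := by
          rcases hpP with h | h
          · exact absurd h hpnS
          · exact h
        obtain ⟨⟨hp0, hpn⟩, hEk⟩ := (hmemE0 p).mp ((PySem.Set.mem_diff _ _ _).mp hpE).1
        have hSfalse : sk.any (fun k => k == p + s_offset) = false := by
          by_contra hf
          have : sk.any (fun k => k == p + s_offset) = true := by
            cases hval : sk.any (fun k => k == p + s_offset)
            · exact absurd hval hf
            · rfl
          exact hpnS ((hmemS p).mpr ⟨⟨by omega, hpn⟩, (hanyS p).mp this⟩)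
        have hEtrue : (ek.any (fun k => k == p + s_offset) && !(p == 0)) = true := by
          have h1 := (hanyE p).mpr hEk
          have h2 : (p == 0) = false := by simp; omega
          rw [h1, h2]; rfl
        rw [if_neg hc]
        unfold pvTag
        rw [if_neg (by rw [hSfalse]; exact Bool.false_ne_true), if_pos hEtrue]
  simp only [hcore]
  rfl
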